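-- pv_equiv track=rewrite | github.com/NessTal/lab_database | lab_database/back_end.py | devide_dict
-- ===== SOURCE A (Python) =====
-- subject_fields = ['first_name','last_name','subject_ID','mail','date_of_birth','gender','hebrew_age','other_languages',
--                   'dominant_hand','reading_span','subject_notes','send_mails']
--
-- experiment_fields = ['experiment_name','experimenter_name','experimenter_mail','lab', 'duration','location','fields','key_words','description']
--
-- def devide_dict(dict):
--     sub_dict = {}
--     exp_dict = {}
--     ses_dict = {}
--     for key, val in dict.items():
--         if key in subject_fields:
--             sub_dict[key] = val
--         elif key in experiment_fields:
--             exp_dict[key] = val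
--         else:
--             ses_dict[key] = val
--     return sub_dict, exp_dict, ses_dict
-- ===== SOURCE B (Python) =====
-- subject_fields = ['first_name','last_name','subject_ID','mail','date_of_birth','gender','hebrew_age','other_languages',
--                   'dominant_hand','reading_span','subject_notes','send_mails']
--
-- experiment_fields = ['experiment_name','experimenter_name','experimenter_mail','lab', 'duration','location','fields','key_words','description']
--
-- def _split(pairs, keys):
--     """Two-way partition: (items whose key is in keys, the remainder), both in input order."""
--     matched = []
--     rest = []
--     for k, v in pairs:
--         if k in keys:
--             matched.append((k, v))
--         else:
--             rest.append((k, v))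
--     return matched, rest
--
-- def devide_dict(dict):
--     # staged partition: peel off the subject items, then peel the experiment
--     # items off the remainder; whatever is left is the session part
--     sub, rest = _split(dict.items(), set(subject_fields))
--     exp, rest = _split(rest, set(experiment_fields))
--     sub_dict = {k: v for k, v in sub}
--     exp_dict = {k: v for k, v in exp}
--     ses_dict = {k: v for k, v in rest}
--     return sub_dict, exp_dict, ses_dict
-- ===== Notes on version B (the rewrite author's own statement) =====
-- stated objective: alternative
-- what changed: Replaces A's single pass threading three dict accumulators through if/elif/else by a staged two-way partition: one reusable split helper peels the subject items off the input, is applied again to peel the experiment items off the remainder, and the leftover remainder is the session dict (so the second pass never re-tests subject membership).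
import Mathlib
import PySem

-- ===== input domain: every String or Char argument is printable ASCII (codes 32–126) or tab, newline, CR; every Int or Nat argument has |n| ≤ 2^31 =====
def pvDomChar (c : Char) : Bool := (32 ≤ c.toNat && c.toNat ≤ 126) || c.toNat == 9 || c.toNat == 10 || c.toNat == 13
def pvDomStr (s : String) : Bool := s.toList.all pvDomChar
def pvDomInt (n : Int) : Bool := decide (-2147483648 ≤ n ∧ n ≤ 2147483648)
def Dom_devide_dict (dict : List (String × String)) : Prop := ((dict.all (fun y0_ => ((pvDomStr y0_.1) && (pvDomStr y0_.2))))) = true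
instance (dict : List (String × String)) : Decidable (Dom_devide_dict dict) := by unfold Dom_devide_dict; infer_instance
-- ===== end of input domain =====

-- B replaces A's single loop with three if/elif/else dict accumulators by a staged two-way
-- partition: a split helper peels subject items off the input, is applied again to the remainder
-- for experiment items, and the final remainder is the session part (alternative decomposition).


-- ===== PORT A =====
def subject_fields : List String := ["first_name","last_name","subject_ID","mail","date_of_birth","gender","hebrew_age","other_languages","dominant_hand","reading_span","subject_notes","send_mails"]

def experiment_fields : List String := ["experiment_name","experimenter_name","experimenter_mail","lab","duration","location","fields","key_words","description"]

-- A: one loop over the input, threading three dict accumulators through if/elif/else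
def devide_dict (dict : List (String × String)) : (List (String × String)) × (List (String × String)) × (List (String × String)) :=
  let r := dict.foldl
    (fun (acc : PySem.Dict String String × PySem.Dict String String × PySem.Dict String String) kv =>
      if subject_fields.contains kv.1 then (acc.1.insert kv.1 kv.2, acc.2.1, acc.2.2)
      else if experiment_fields.contains kv.1 then (acc.1, acc.2.1.insert kv.1 kv.2, acc.2.2)
      else (acc.1, acc.2.1, acc.2.2.insert kv.1 kv.2))
    (PySem.Dict.empty, PySem.Dict.empty, PySem.Dict.empty)
  (r.1.items, r.2.1.items, r.2.2.items)

-- ===== PORT B =====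
-- B helper _split: two-way partition into (matched, remainder), both in input order
def splitPairs (pairs : List (String × String)) (keys : PySem.Set String) : List (String × String) × List (String × String) :=
  pairs.foldl
    (fun (acc : List (String × String) × List (String × String)) kv =>
      if keys.contains kv.1 then (acc.1 ++ [kv], acc.2) else (acc.1, acc.2 ++ [kv]))
    ([], [])

-- B: staged partition — peel subject items off, then experiment items off the remainder;
-- the leftover is the session part; each list is turned into a dict at the end
def devide_dict_alt (dict : List (String × String)) : (List (String × String)) × (List (String × String)) × (List (String × String)) :=
  let p1 := splitPairs dict (PySem.Set.ofList subject_fields)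
  let p2 := splitPairs p1.2 (PySem.Set.ofList experiment_fields)
  ((PySem.Dict.ofList p1.1).items, (PySem.Dict.ofList p2.1).items, (PySem.Dict.ofList p2.2).items)

-- ===== PRECONDITION & SPEC =====
-- Pre_ requires distinct keys: the Python argument is a dict, whose rendering as an
-- association list always has distinct keys, so no Python input is excluded.
def Pre_devide_dict (dict : List (String × String)) : Prop := (dict.map Prod.fst).Nodup
instance (dict : List (String × String)) : Decidable (Pre_devide_dict dict) := by unfold Pre_devide_dict; infer_instance

def pvWitness_devide_dict : (List (String × String)) := [("first_name","Ada"), ("lab","L1"), ("foo","bar")]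

def Spec_devide_dict (dict : List (String × String)) (out : (List (String × String)) × (List (String × String)) × (List (String × String))) : Prop := out = devide_dict_alt dict
instance (dict : List (String × String)) (out : (List (String × String)) × (List (String × String)) × (List (String × String))) : Decidable (Spec_devide_dict dict out) := by unfold Spec_devide_dict; infer_instance

-- ===== CLAIM (what is proved, stated in full; the proofs are below) =====
def Claim_equal_devide_dict : Prop := ∀ (dict : List (String × String)), Dom_devide_dict dict → Pre_devide_dict dict → Spec_devide_dict dict (devide_dict dict)

-- ===== LEMMAS AND PROOFS =====

-- B's split helper computes the two complementary filters, in order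
lemma splitPairs_eq (l : List (String × String)) (keys : PySem.Set String) :
    splitPairs l keys =
      (l.filter (fun kv => keys.contains kv.1), l.filter (fun kv => !keys.contains kv.1)) := by
  unfold splitPairs
  suffices h : ∀ (a b : List (String × String)),
      l.foldl (fun (acc : List (String × String) × List (String × String)) kv =>
        if keys.contains kv.1 then (acc.1 ++ [kv], acc.2) else (acc.1, acc.2 ++ [kv])) (a, b) =
      (a ++ l.filter (fun kv => keys.contains kv.1), b ++ l.filter (fun kv => !keys.contains kv.1)) by
    simpa using h [] []
  induction l with
  | nil => intro a b; simp
  | cons kv t ih =>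
    intro a b
    rw [List.foldl_cons]
    by_cases hk : keys.contains kv.1 = true
    · rw [if_pos hk, ih]
      have hk' : kv.1 ∈ keys := by simpa [PySem.Set.contains_eq_listContains] using hk
      simp [hk']
    · rw [if_neg hk, ih]
      simp only [Bool.not_eq_true] at hk
      have hk' : kv.1 ∉ keys := by simpa [PySem.Set.contains_eq_listContains] using hk
      simp [hk']

-- dict() of a list with distinct keys keeps exactly that list as its items
lemma items_ofList_of_nodup (l : List (String × String)) (h : (l.map Prod.fst).Nodup) :
    (PySem.Dict.ofList l).items = l := by
  have : PySem.Dict.ofList l =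
      l.foldl (fun (d : PySem.Dict String String) p => d.insert p.1 p.2) PySem.Dict.empty := rfl
  rw [this]
  have := PySem.Dict.items_foldl_insert_fresh (l := l) (k := Prod.fst) (v := Prod.snd)
    (d := PySem.Dict.empty) (by intro a _; exact PySem.Dict.contains_empty _) h
  simpa using this

-- set-membership tests agree with A's list-membership tests
lemma setOf_contains (fs : List String) (k : String) :
    (PySem.Set.ofList fs).contains k = fs.contains k := by
  simp [PySem.Set.contains_eq_listContains, List.contains_eq_mem, PySem.Set.mem_ofList]

-- A's loop invariant: folding A's step over l from accumulators whose keys are fresh for l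
-- appends exactly the three membership filters of l to the accumulators' items
lemma loop_eq (l : List (String × String)) :
    ∀ (s e o : PySem.Dict String String),
      (l.map Prod.fst).Nodup →
      (∀ p ∈ l, s.contains p.1 = false ∧ e.contains p.1 = false ∧ o.contains p.1 = false) →
      (l.foldl
        (fun (acc : PySem.Dict String String × PySem.Dict String String × PySem.Dict String String) kv =>
          if subject_fields.contains kv.1 then (acc.1.insert kv.1 kv.2, acc.2.1, acc.2.2)
          else if experiment_fields.contains kv.1 then (acc.1, acc.2.1.insert kv.1 kv.2, acc.2.2)
          else (acc.1, acc.2.1, acc.2.2.insert kv.1 kv.2)) (s, e, o)) =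
      (⟨s.items ++ l.filter (fun kv => subject_fields.contains kv.1)⟩,
       ⟨e.items ++ l.filter (fun kv => !subject_fields.contains kv.1 && experiment_fields.contains kv.1)⟩,
       ⟨o.items ++ l.filter (fun kv => !subject_fields.contains kv.1 && !experiment_fields.contains kv.1)⟩) := by
  induction l with
  | nil => intro s e o _ _; simp
  | cons kv t ih =>
    intro s e o hnd hf
    obtain ⟨k, v⟩ := kv
    rw [List.map_cons, List.nodup_cons] at hnd
    obtain ⟨hk, hndt⟩ := hnd
    have hfp : ∀ p ∈ t, (p.1 == k) = false := by
      intro p hp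
      have hm : p.1 ∈ t.map Prod.fst := List.mem_map_of_mem hp
      have : p.1 ≠ k := fun h => hk (h ▸ hm)
      simpa using this
    have hhead := hf (k, v) List.mem_cons_self
    have hft : ∀ p ∈ t, s.contains p.1 = false ∧ e.contains p.1 = false ∧ o.contains p.1 = false :=
      fun p hp => hf p (List.mem_cons_of_mem _ hp)
    rw [List.foldl_cons]
    by_cases hs : subject_fields.contains k = true
    · have hins : ∀ p ∈ t, (PySem.Dict.insert s k v).contains p.1 = false := by
        intro p hp
        rw [PySem.Dict.contains_insert]
        simp [hfp p hp, (hft p hp).1]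
      simp only [hs, if_true]
      rw [ih (s.insert k v) e o hndt (fun p hp => ⟨hins p hp, (hft p hp).2.1, (hft p hp).2.2⟩)]
      have hsm : k ∈ subject_fields := by simpa using hs
      simp [hsm, PySem.Dict.items_insert_of_not_contains _ _ hhead.1]
    · by_cases he : experiment_fields.contains k = true
      · have hins : ∀ p ∈ t, (PySem.Dict.insert e k v).contains p.1 = false := by
          intro p hp
          rw [PySem.Dict.contains_insert]
          simp [hfp p hp, (hft p hp).2.1]
        simp only [hs, he, if_true, if_false, Bool.false_eq_true]
        rw [ih s (e.insert k v) o hndt (fun p hp => ⟨(hft p hp).1, hins p hp, (hft p hp).2.2⟩)]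
        have hsm : k ∉ subject_fields := by simpa using hs
        have hem : k ∈ experiment_fields := by simpa using he
        simp [hsm, hem, PySem.Dict.items_insert_of_not_contains _ _ hhead.2.1]
      · have hins : ∀ p ∈ t, (PySem.Dict.insert o k v).contains p.1 = false := by
          intro p hp
          rw [PySem.Dict.contains_insert]
          simp [hfp p hp, (hft p hp).2.2]
        simp only [hs, he, if_false, Bool.false_eq_true]
        rw [ih s e (o.insert k v) hndt (fun p hp => ⟨(hft p hp).1, (hft p hp).2.1, hins p hp⟩)]
        have hsm : k ∉ subject_fields := by simpa using hs
        have hem : k ∉ experiment_fields := by simpa using he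
        simp [hsm, hem, PySem.Dict.items_insert_of_not_contains _ _ hhead.2.2]

-- a filtered sublist of a nodup-keys list still has nodup keys
lemma nodup_keys_filter (l : List (String × String)) (p : String × String → Bool)
    (h : (l.map Prod.fst).Nodup) : ((l.filter p).map Prod.fst).Nodup :=
  h.sublist ((l.filter_sublist (p := p)).map Prod.fst)

-- ===== VERDICT (by name: the statement is the Claim_ definition above) =====
theorem devide_dict_spec : Claim_equal_devide_dict := by
  intro dict _ hpre
  unfold Spec_devide_dict devide_dict devide_dict_alt
  rw [loop_eq dict PySem.Dict.empty PySem.Dict.empty PySem.Dict.empty hpre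
      (fun p _ => ⟨PySem.Dict.contains_empty _, PySem.Dict.contains_empty _, PySem.Dict.contains_empty _⟩)]
  simp only [splitPairs_eq, setOf_contains, List.filter_filter]
  rw [items_ofList_of_nodup _ (nodup_keys_filter _ _ hpre),
      items_ofList_of_nodup _ (nodup_keys_filter _ _ hpre),
      items_ofList_of_nodup _ (nodup_keys_filter _ _ hpre)]
  simp [PySem.Dict.empty, Bool.and_comm]
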